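-- pv_equiv track=rewrite | github.com/lvpengcheng/DataMerge | backend/ai_engine/ai_provider.py | _find_overlap_point
-- ===== SOURCE A (Python) =====
-- def _find_overlap_point(existing_code: str, new_code: str) -> int:
--     """在新代码中找到与已有代码重叠的结束位置（基于序列匹配）
--
--     使用已有代码末尾的连续行与新代码开头的连续行做序列比对，
--     找到最长的重叠前缀，返回新代码中非重叠部分的起始行索引。
--
--     Args:
--         existing_code: 已有的代码
--         new_code: 续传返回的新代码
--
--     Returns:
--         新代码中非重叠部分的起始行索引（对应raw lines）
--     """
--     existing_raw = existing_code.strip().split('\n')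
--     new_raw = new_code.strip().split('\n')
--
--     if not existing_raw or not new_raw:
--         return 0
--
--     # strip每行用于比较，但索引对应raw lines
--     tail_size = min(50, len(existing_raw))
--     existing_tail = [l.strip() for l in existing_raw[-tail_size:]]
--     new_stripped = [l.strip() for l in new_raw]
--
--     # 策略1: 寻找最长的连续序列匹配
--     # 检查 existing_tail 的某个后缀是否等于 new_stripped 的等长前缀
--     best_overlap = 0
--     for start in range(len(existing_tail)):
--         suffix = existing_tail[start:]
--         match_len = 0
--         for j in range(min(len(suffix), len(new_stripped))):
--             if suffix[j] == new_stripped[j]: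
--                 match_len = j + 1
--             else:
--                 break
--         # 至少3行连续匹配才算有效重叠，防止单行巧合
--         if match_len >= 3 and match_len > best_overlap:
--             best_overlap = match_len
--
--     if best_overlap > 0:
--         return best_overlap
--
--     # 策略2: 检查新代码开头是否有零散的重复行（import/def等）
--     existing_tail_set = set(existing_tail)
--     overlap = 0
--     for i, line in enumerate(new_stripped):
--         if not line or line.startswith('#'):
--             overlap = i + 1
--             continue
--         if line in existing_tail_set:
--             overlap = i + 1
--         else:
--             break
--
--     return overlap
-- ===== SOURCE B (Python) =====
-- def _find_overlap_point(existing_code: str, new_code: str) -> int: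
--     existing_raw = existing_code.strip().split('\n')
--     new_raw = new_code.strip().split('\n')
--
--     if not existing_raw or not new_raw:
--         return 0
--
--     tail_size = min(50, len(existing_raw))
--     existing_tail = [l.strip() for l in existing_raw[-tail_size:]]
--     new_stripped = [l.strip() for l in new_raw]
--
--     # Strategy 1 via an index table: only starts whose line equals the first
--     # new line can yield a match of length >= 1, so only those are extended.
--     index = {}
--     for i, line in enumerate(existing_tail):
--         index.setdefault(line, []).append(i)
--
--     best_overlap = 0
--     for start in index.get(new_stripped[0], []):
--         k = 0
--         while (start + k < len(existing_tail) and k < len(new_stripped)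
--                and existing_tail[start + k] == new_stripped[k]):
--             k += 1
--         if k >= 3 and k > best_overlap:
--             best_overlap = k
--
--     if best_overlap > 0:
--         return best_overlap
--
--     # Strategy 2: leading blank/comment/duplicate lines, as a while loop.
--     existing_tail_set = set(existing_tail)
--     overlap = 0
--     i = 0
--     while i < len(new_stripped):
--         line = new_stripped[i]
--         if not line or line.startswith('#') or line in existing_tail_set:
--             overlap = i + 1
--             i += 1
--         else:
--             break
--     return overlap
-- ===== Notes on version B (the rewrite author's own statement) =====
-- stated objective: alternative
-- what changed: Strategy 1's scan that extends a match from every start position of the tail is replaced by a dict index mapping each tail line to its positions, so matches are extended only from positions of the first new line (found by one hash lookup); strategy 2 becomes a while loop with a merged condition.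
import Mathlib
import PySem

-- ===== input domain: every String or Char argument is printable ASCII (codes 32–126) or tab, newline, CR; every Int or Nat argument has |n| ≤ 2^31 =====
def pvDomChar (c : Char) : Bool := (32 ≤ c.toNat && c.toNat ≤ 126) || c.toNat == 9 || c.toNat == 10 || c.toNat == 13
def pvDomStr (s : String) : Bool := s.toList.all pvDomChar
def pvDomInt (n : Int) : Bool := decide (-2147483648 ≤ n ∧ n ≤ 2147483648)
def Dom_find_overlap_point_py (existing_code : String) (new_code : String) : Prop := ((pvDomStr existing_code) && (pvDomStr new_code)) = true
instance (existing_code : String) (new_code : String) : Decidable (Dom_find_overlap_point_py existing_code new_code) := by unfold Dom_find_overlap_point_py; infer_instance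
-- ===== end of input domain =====

-- B replaces A's scan over every start position by a dict index from each tail line to
-- its positions, extending only from positions of the first new line (objective: alternative).

-- shared preprocessing (identical Python lines in A and B): code.strip().split('\n');
-- the separator "\n" is nonempty so split? is always some and getD [] is exact
def pvLines (s : String) : List String := (PySem.Str.split? (PySem.Str.strip s) "\n").getD []

-- [l.strip() for l in raw[-min(50,len(raw)):]]; raw ≠ [] so 1 ≤ tail_size ≤ len and the
-- negative slice raw[-t:] is exactly 'drop (len - t)'
def pvTail (raw : List String) : List String :=
  (raw.drop (raw.length - min 50 raw.length)).map PySem.Str.strip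

-- ===== PORT A =====
-- inner loop of strategy 1: match_len grows while lines agree, break on first mismatch
def pvMatchLenA : List String → List String → Nat
  | a :: as, b :: bs => if a = b then pvMatchLenA as bs + 1 else 0
  | _, _ => 0

-- 'for start in range(len(existing_tail))' with suffix = existing_tail[start:] (= drop start)
def pvBestA (tail new : List String) : Nat :=
  (List.range tail.length).foldl (fun best start =>
    let m := pvMatchLenA (tail.drop start) new
    if 3 ≤ m ∧ best < m then m else best) 0

-- strategy 2: 'for i, line in enumerate(new_stripped)' with break
def pvStrat2A (tset : PySem.Set String) : List String → Nat → Nat → Nat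
  | [], _, ov => ov
  | line :: rest, i, ov =>
    if line = "" ∨ PySem.Str.startswith line "#" = true then pvStrat2A tset rest (i + 1) (i + 1)
    else if line ∈ tset then pvStrat2A tset rest (i + 1) (i + 1)
    else ov

def find_overlap_point_py (existing_code : String) (new_code : String) : Int :=
  let existing_raw := pvLines existing_code
  let new_raw := pvLines new_code
  if existing_raw = [] ∨ new_raw = [] then 0
  else
    let existing_tail := pvTail existing_raw
    let new_stripped := new_raw.map PySem.Str.strip
    let best := pvBestA existing_tail new_stripped
    if 0 < best then (best : Int)
    else (pvStrat2A (PySem.Set.ofList existing_tail) new_stripped 0 0 : Int)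

-- ===== PORT B =====
-- index.setdefault(line, []).append(i) over enumerate(existing_tail)
def pvBuildIdx : List String → Nat → PySem.Dict String (List Nat) → PySem.Dict String (List Nat)
  | [], _, d => d
  | l :: ls, i, d => pvBuildIdx ls (i + 1) (d.insert l (d.getD l [] ++ [i]))

-- the while loop extending a candidate start
def pvExt (tail new : List String) (start k : Nat) : Nat :=
  if h : start + k < tail.length ∧ k < new.length ∧ tail[start + k]? = new[k]? then
    pvExt tail new start (k + 1)
  else k
termination_by new.length - k
decreasing_by omega

-- 'for start in index.get(new_stripped[0], [])'
def pvBestB (tail new : List String) (cands : List Nat) : Nat :=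
  cands.foldl (fun best start =>
    let k := pvExt tail new start 0
    if 3 ≤ k ∧ best < k then k else best) 0

-- strategy 2 as a while loop with a merged condition
def pvStrat2B (tset : PySem.Set String) (new : List String) (i ov : Nat) : Nat :=
  if h : i < new.length then
    if new[i] = "" ∨ PySem.Str.startswith new[i] "#" = true ∨ new[i] ∈ tset
    then pvStrat2B tset new (i + 1) (i + 1)
    else ov
  else ov
termination_by new.length - i

def find_overlap_point_py_alt (existing_code : String) (new_code : String) : Int :=
  let existing_raw := pvLines existing_code
  let new_raw := pvLines new_code
  if existing_raw = [] ∨ new_raw = [] then 0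
  else
    let existing_tail := pvTail existing_raw
    let new_stripped := new_raw.map PySem.Str.strip
    let idx := pvBuildIdx existing_tail 0 PySem.Dict.empty
    -- new_stripped[0]: new_raw ≠ [] in this branch, so new_stripped is nonempty
    let cands := idx.getD (new_stripped.headD "") []
    let best := pvBestB existing_tail new_stripped cands
    if 0 < best then (best : Int)
    else (pvStrat2B (PySem.Set.ofList existing_tail) new_stripped 0 0 : Int)

-- ===== PRECONDITION & SPEC =====
def Spec_find_overlap_point_py (existing_code : String) (new_code : String) (out : Int) : Prop := out = find_overlap_point_py_alt existing_code new_code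
instance (existing_code : String) (new_code : String) (out : Int) : Decidable (Spec_find_overlap_point_py existing_code new_code out) := by unfold Spec_find_overlap_point_py; infer_instance

-- ===== CLAIM (what is proved, stated in full; the proofs are below) =====
def Claim_equal_find_overlap_point_py : Prop := ∀ (existing_code : String) (new_code : String), Dom_find_overlap_point_py existing_code new_code → Spec_find_overlap_point_py existing_code new_code (find_overlap_point_py existing_code new_code)

-- ===== LEMMAS AND PROOFS =====

lemma pvMatchLenA_nil_left (b : List String) : pvMatchLenA [] b = 0 := by
  cases b <;> rfl

lemma pvMatchLenA_nil_right (a : List String) : pvMatchLenA a [] = 0 := by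
  cases a <;> rfl

-- positions of s in ls, offset by i (proof-side spec of the index table)
def pvIdxFrom : List String → Nat → String → List Nat
  | [], _, _ => []
  | l :: ls, i, s => (if l = s then [i] else []) ++ pvIdxFrom ls (i + 1) s

lemma pvBuildIdx_getD (ls : List String) (i : Nat) (d : PySem.Dict String (List Nat)) (s : String) :
    (pvBuildIdx ls i d).getD s [] = d.getD s [] ++ pvIdxFrom ls i s := by
  induction ls generalizing i d with
  | nil => simp [pvBuildIdx, pvIdxFrom]
  | cons l ls ih =>
    simp only [pvBuildIdx, pvIdxFrom, ih, PySem.Dict.getD_insert]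
    by_cases h : s = l
    · subst h; simp
    · simp [h, Ne.symm h]

lemma pvIdxFrom_eq (ls : List String) (i : Nat) (s : String) :
    pvIdxFrom ls i s =
      ((List.range ls.length).filter (fun j => decide (ls[j]? = some s))).map (· + i) := by
  induction ls generalizing i with
  | nil => simp [pvIdxFrom]
  | cons l ls ih =>
    have hq : ∀ X : List Nat,
        List.map (fun x => x + i) (List.map Nat.succ X) = List.map (fun x => x + (i + 1)) X := by
      intro X; rw [List.map_map]; apply List.map_congr_left; intro a _
      simp [Function.comp]; omega
    have hf : List.filter ((fun j => decide ((l :: ls)[j]? = some s)) ∘ Nat.succ)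
          (List.range ls.length)
        = List.filter (fun j => decide (ls[j]? = some s)) (List.range ls.length) := by
      apply List.filter_congr; intro a _; simp [Function.comp]
    rw [pvIdxFrom, ih, List.length_cons, List.range_succ_eq_map, List.filter_cons,
      List.filter_map, hf]
    by_cases h : l = s
    · rw [if_pos h, if_pos (by simp [h])]
      simp [hq]
    · rw [if_neg h, if_neg (by simp [h])]
      simp [hq]

lemma pvExt_eq (tail new : List String) (start : Nat) :
    ∀ k, pvExt tail new start k = k + pvMatchLenA (tail.drop (start + k)) (new.drop k) := by
  intro k
  induction hn : new.length - k using Nat.strong_induction_on generalizing k with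
  | _ n ih =>
  subst hn
  rw [pvExt]
  split
  · rename_i h
    obtain ⟨h1, h2, h3⟩ := h
    have e1 : tail.drop (start + k) = tail[start + k] :: tail.drop (start + k + 1) :=
      List.drop_eq_getElem_cons h1
    have e2 : new.drop k = new[k] :: new.drop (k + 1) := List.drop_eq_getElem_cons h2
    have heq : tail[start + k] = new[k] := by
      simp only [List.getElem?_eq_getElem h1, List.getElem?_eq_getElem h2,
        Option.some_inj] at h3
      exact h3
    rw [ih (new.length - (k + 1)) (by omega) (k + 1) rfl]
    rw [e1, e2, pvMatchLenA, if_pos heq]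
    have : start + (k + 1) = start + k + 1 := by omega
    rw [this]; omega
  · rename_i h
    push_neg at h
    rcases Nat.lt_or_ge k new.length with hk | hk
    · rcases Nat.lt_or_ge (start + k) tail.length with ht | ht
      · have h3 := h ht hk
        have e1 : tail.drop (start + k) = tail[start + k] :: tail.drop (start + k + 1) :=
          List.drop_eq_getElem_cons ht
        have e2 : new.drop k = new[k] :: new.drop (k + 1) := List.drop_eq_getElem_cons hk
        have hne : tail[start + k] ≠ new[k] := by
          intro he
          exact h3 (by simp [List.getElem?_eq_getElem ht, List.getElem?_eq_getElem hk, he])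
        rw [e1, e2, pvMatchLenA, if_neg hne]; omega
      · rw [List.drop_eq_nil_of_le ht, pvMatchLenA_nil_left]; omega
    · rw [List.drop_eq_nil_of_le hk, pvMatchLenA_nil_right]; omega

-- strategy 1: scanning every start equals extending only the indexed candidates
lemma pvBest_eq (tail : List String) (a : String) (rest : List String) :
    pvBestA tail (a :: rest) =
      pvBestB tail (a :: rest) ((pvBuildIdx tail 0 PySem.Dict.empty).getD a []) := by
  have hc : (pvBuildIdx tail 0 PySem.Dict.empty).getD a [] =
      (List.range tail.length).filter (fun j => decide (tail[j]? = some a)) := by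
    rw [pvBuildIdx_getD, pvIdxFrom_eq]
    simp [PySem.Dict.getD, PySem.Dict.get?, PySem.Dict.empty]
  rw [pvBestB, hc, List.foldl_filter, pvBestA]
  apply PySem.List.foldl_congr_mem
  intro acc start hstart
  simp only [pvExt_eq, Nat.add_zero, List.drop_zero]
  by_cases hp : tail[start]? = some a
  · simp [hp]
  · have hm : pvMatchLenA (tail.drop start) (a :: rest) = 0 := by
      rcases Nat.lt_or_ge start tail.length with ht | ht
      · rw [List.drop_eq_getElem_cons ht, pvMatchLenA, if_neg]
        intro he
        exact hp (by simp [List.getElem?_eq_getElem ht, he])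
      · rw [List.drop_eq_nil_of_le ht, pvMatchLenA_nil_left]
    simp [hp, hm]

-- strategy 2: the while loop equals the enumerate loop
lemma pvStrat2_eq (tset : PySem.Set String) (new : List String) :
    ∀ i ov, pvStrat2B tset new i ov = pvStrat2A tset (new.drop i) i ov := by
  intro i ov
  induction hn : new.length - i using Nat.strong_induction_on generalizing i ov with
  | _ n ih =>
  subst hn
  rw [pvStrat2B]
  split
  · rename_i h
    rw [List.drop_eq_getElem_cons h, pvStrat2A]
    rw [ih (new.length - (i + 1)) (by omega) (i + 1) (i + 1) rfl]
    by_cases hA : new[i] = "" <;> by_cases hB : PySem.Str.startswith new[i] "#" = true <;>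
      by_cases hC : new[i] ∈ tset <;> simp [hA, hB, hC]
  · rename_i h
    rw [List.drop_eq_nil_of_le (by omega), pvStrat2A]

-- ===== VERDICT (by name: the statement is the Claim_ definition above) =====
theorem find_overlap_point_py_spec : Claim_equal_find_overlap_point_py := by
  intro existing_code new_code _
  unfold Spec_find_overlap_point_py find_overlap_point_py find_overlap_point_py_alt
  simp only []
  by_cases hg : pvLines existing_code = [] ∨ pvLines new_code = []
  · rw [if_pos hg, if_pos hg]
  · push_neg at hg
    obtain ⟨h, t, hnew⟩ := List.exists_cons_of_ne_nil hg.2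
    rw [hnew]
    have hC : ¬ (pvLines existing_code = [] ∨ h :: t = []) := by simp [hg.1]
    rw [if_neg hC, if_neg hC]
    simp only [List.map_cons, List.headD_cons]
    rw [pvBest_eq, pvStrat2_eq, List.drop_zero]
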